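-- pv_equiv track=rewrite | github.com/kenoxa/spine | skills/do-debrief/scripts/aggregate.py | _pick_diverse_prompts
-- ===== SOURCE A (Python) =====
-- def _pick_diverse_prompts(prompts: list[str], max_count: int) -> list[str]:
--     """Pick prompts preferring longest unique ones for diversity."""
--     seen: set[str] = set()
--     unique: list[str] = []
--     for p in prompts:
--         normalized = p.strip().lower()
--         if normalized not in seen:
--             seen.add(normalized)
--             unique.append(p)
--     unique.sort(key=len, reverse=True)
--     return unique[:max_count]
-- ===== SOURCE B (Python) =====
-- def _pick_diverse_prompts(prompts: list[str], max_count: int) -> list[str]: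
--     """Pick prompts preferring longest unique ones for diversity."""
--     # dedup: first prompt per normalized form, via dict.setdefault (insertion order)
--     first_by_norm: dict[str, str] = {}
--     for p in prompts:
--         first_by_norm.setdefault(p.strip().lower(), p)
--     # bucket (counting) sort by length instead of a comparison sort
--     buckets: dict[int, list[str]] = {}
--     for p in first_by_norm.values():
--         buckets.setdefault(len(p), []).append(p)
--     result: list[str] = []
--     for k in sorted(buckets, reverse=True):
--         result.extend(buckets[k])
--     return result[:max_count]
-- ===== Notes on version B (the rewrite author's own statement) =====
-- stated objective: alternative
-- what changed: B dedups via a dict keyed by the normalized prompt using setdefault (taking its values) instead of A's seen-set-plus-list loop, and replaces the comparison sort (unique.sort(key=len, reverse=True)) by a stable bucket/counting sort: a dict of lists keyed by length, concatenated in descending key order.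
import Mathlib
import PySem

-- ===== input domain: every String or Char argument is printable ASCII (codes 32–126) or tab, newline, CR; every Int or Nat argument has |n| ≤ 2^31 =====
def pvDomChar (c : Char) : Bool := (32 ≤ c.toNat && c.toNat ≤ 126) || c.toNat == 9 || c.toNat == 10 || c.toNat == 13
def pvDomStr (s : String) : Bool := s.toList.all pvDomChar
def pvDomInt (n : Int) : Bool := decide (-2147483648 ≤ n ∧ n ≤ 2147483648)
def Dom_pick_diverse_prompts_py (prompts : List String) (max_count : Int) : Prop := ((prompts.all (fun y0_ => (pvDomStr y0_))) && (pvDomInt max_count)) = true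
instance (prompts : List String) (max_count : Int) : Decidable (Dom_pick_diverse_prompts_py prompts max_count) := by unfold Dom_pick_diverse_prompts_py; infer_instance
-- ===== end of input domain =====

-- B replaces A's comparison sort by a stable bucket sort over a dict of lists keyed by length (alternative algorithm, same result).


-- ===== PORT A =====
def pick_diverse_prompts_py (prompts : List String) (max_count : Int) : List String :=
  let st := prompts.foldl (fun (st : PySem.Set String × List String) p =>
      let normalized := PySem.Str.lower (PySem.Str.strip p)
      if PySem.Set.contains st.1 normalized then st
      else (PySem.Set.add st.1 normalized, st.2 ++ [p])) (PySem.Set.empty, ([] : List String))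
  PySem.List.slice (PySem.List.sorted st.2 (fun p => PySem.Str.len p) true) none (some max_count)

-- ===== PORT B =====
def pick_diverse_prompts_py_alt (prompts : List String) (max_count : Int) : List String :=
  let first_by_norm := prompts.foldl (fun (d : PySem.Dict String String) p =>
      PySem.Dict.setdefault d (PySem.Str.lower (PySem.Str.strip p)) p) PySem.Dict.empty
  let unique := PySem.Dict.values first_by_norm
  let buckets := unique.foldl (fun (d : PySem.Dict Int (List String)) p =>
      PySem.Dict.modify d (PySem.Str.len p) [] (fun b => b ++ [p])) PySem.Dict.empty
  let result := (PySem.List.sorted (PySem.Dict.keys buckets) (fun k => k) true).foldl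
      (fun acc k => acc ++ PySem.Dict.getD buckets k []) []
  PySem.List.slice result none (some max_count)

-- ===== PRECONDITION & SPEC =====
def Spec_pick_diverse_prompts_py (prompts : List String) (max_count : Int) (out : List String) : Prop := out = pick_diverse_prompts_py_alt prompts max_count
instance (prompts : List String) (max_count : Int) (out : List String) : Decidable (Spec_pick_diverse_prompts_py prompts max_count out) := by unfold Spec_pick_diverse_prompts_py; infer_instance

-- ===== CLAIM (what is proved, stated in full; the proofs are below) =====
def Claim_equal_pick_diverse_prompts_py : Prop := ∀ (prompts : List String) (max_count : Int), Dom_pick_diverse_prompts_py prompts max_count → Spec_pick_diverse_prompts_py prompts max_count (pick_diverse_prompts_py prompts max_count)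

-- ===== LEMMAS AND PROOFS =====

-- the `before` test PySem's reverse insertion sort uses for key = len
def gtLen : String → String → Bool := fun a b => decide (PySem.Str.len b < PySem.Str.len a)

-- insert a key into a strictly descending key list (no duplicates)
def insKey (K : Int) : List Int → List Int
  | [] => [K]
  | k :: ks => if k < K then K :: k :: ks else if K = k then k :: ks else k :: insKey K ks

-- concatenation of the length-buckets of l in the key order ks
def bucketize (ks : List Int) (l : List String) : List String :=
  ks.flatMap (fun k => l.filter (fun s => PySem.Str.len s == k))

theorem mem_insKey {m K : Int} {ks : List Int} : m ∈ insKey K ks ↔ m = K ∨ m ∈ ks := by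
  induction ks with
  | nil => simp [insKey]
  | cons k ks ih =>
    simp only [insKey]
    split_ifs with h1 h2
    · simp [List.mem_cons]; try tauto
    · subst h2; simp [List.mem_cons]; try tauto
    · simp [List.mem_cons, ih]; try tauto

theorem pairwise_insKey {K : Int} {ks : List Int} (h : ks.Pairwise (fun a b => b < a)) :
    (insKey K ks).Pairwise (fun a b => b < a) := by
  induction ks with
  | nil => simp [insKey]
  | cons k ks ih =>
    rcases List.pairwise_cons.mp h with ⟨hk, ht⟩
    simp only [insKey]
    split_ifs with h1 h2
    · refine List.pairwise_cons.mpr ⟨?_, h⟩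
      intro m hm
      rcases List.mem_cons.mp hm with rfl | hm
      · exact h1
      · exact lt_trans (hk m hm) h1
    · subst h2; exact h
    · refine List.pairwise_cons.mpr ⟨?_, ih ht⟩
      intro m hm
      rcases mem_insKey.mp hm with rfl | hm
      · omega
      · exact hk m hm

theorem mem_bucketize {y : String} {ks : List Int} {l : List String}
    (h : y ∈ bucketize ks l) : ∃ k ∈ ks, PySem.Str.len y = k := by
  simp only [bucketize, List.mem_flatMap, List.mem_filter] at h
  rcases h with ⟨k, hk, _, hy⟩
  exact ⟨k, hk, by simpa using hy⟩

theorem bucketize_append_notmem {ks : List Int} {l : List String} {x : String}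
    (h : PySem.Str.len x ∉ ks) : bucketize ks (l ++ [x]) = bucketize ks l := by
  induction ks with
  | nil => rfl
  | cons k ks ih =>
    simp only [List.mem_cons, not_or] at h
    have hne : (PySem.Str.len x == k) = false := by simpa using h.1
    simp only [bucketize, List.flatMap_cons] at *
    rw [List.filter_append, ih h.2]
    simp
    simpa using h.1

theorem insertBy_all_lt {x : String} {L : List String}
    (h : ∀ y ∈ L, PySem.Str.len y < PySem.Str.len x) :
    PySem.List.insertBy gtLen x L = x :: L := by
  cases L with
  | nil => rfl
  | cons y ys =>
    have hy : gtLen x y = true := by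
      have := h y (by simp); simp [gtLen]; simpa using this
    simp [PySem.List.insertBy, hy]

theorem insertBy_append_ge {x : String} {L1 L2 : List String}
    (h : ∀ y ∈ L1, ¬ (PySem.Str.len y < PySem.Str.len x)) :
    PySem.List.insertBy gtLen x (L1 ++ L2) = L1 ++ PySem.List.insertBy gtLen x L2 := by
  induction L1 with
  | nil => rfl
  | cons y t ih =>
    have hy : ¬ (PySem.Str.len y < PySem.Str.len x) := h y (by simp)
    have : gtLen x y = false := by simp [gtLen]; simpa using hy
    simp only [List.cons_append, PySem.List.insertBy, this, Bool.false_eq_true, if_false]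
    exact congrArg (y :: ·) (ih (fun z hz => h z (by simp [hz])))

theorem bucketize_cons {k : Int} {ks : List Int} {l : List String} :
    bucketize (k :: ks) l = l.filter (fun s => PySem.Str.len s == k) ++ bucketize ks l := by
  simp [bucketize]

theorem insertBy_bucketize_step {ks : List Int} {l : List String} (x : String)
    (hp : ks.Pairwise (fun a b => b < a))
    (hl : ∀ y ∈ l, PySem.Str.len y = PySem.Str.len x → PySem.Str.len x ∈ ks) :
    PySem.List.insertBy gtLen x (bucketize ks l) =
      bucketize (insKey (PySem.Str.len x) ks) (l ++ [x]) := by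
  induction ks generalizing l with
  | nil =>
    have hfl : l.filter (fun s => PySem.Str.len s == PySem.Str.len x) = [] := by
      apply List.filter_eq_nil_iff.mpr
      intro y hy
      simp only [beq_iff_eq]
      intro he
      exact absurd (hl y hy (by exact_mod_cast he)) (by simp)
    simp only [bucketize, List.flatMap_nil, PySem.List.insertBy, insKey, List.flatMap_cons,
      List.flatMap_nil, List.append_nil, List.filter_append, hfl, List.nil_append]
    simp
  | cons k ks ih =>
    rcases List.pairwise_cons.mp hp with ⟨hk, ht⟩
    rcases lt_trichotomy k (PySem.Str.len x) with hgt | heq | hlt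
    · -- len x is a new maximal key in front
      have hnotin : PySem.Str.len x ∉ k :: ks := by
        intro hmem
        rcases List.mem_cons.mp hmem with he | hmem
        · omega
        · have := hk _ hmem; omega
      have hall : ∀ y ∈ bucketize (k :: ks) l, PySem.Str.len y < PySem.Str.len x := by
        intro y hy
        rcases mem_bucketize hy with ⟨k', hk', he⟩
        rcases List.mem_cons.mp hk' with rfl | hm
        · omega
        · have := hk _ hm; omega
      have hfl : l.filter (fun s => PySem.Str.len s == PySem.Str.len x) = [] := by
        apply List.filter_eq_nil_iff.mpr
        intro y hy
        simp only [beq_iff_eq]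
        intro he
        exact hnotin (hl y hy (by exact_mod_cast he))
      rw [insertBy_all_lt hall,
        show insKey (PySem.Str.len x) (k :: ks) = PySem.Str.len x :: k :: ks from by
          simp only [insKey]; rw [if_pos hgt]]
      conv_rhs => rw [bucketize_cons, List.filter_append, hfl, bucketize_append_notmem hnotin]
      simp
    · -- len x joins the existing front bucket k
      have hxk : PySem.Str.len x ∉ ks := by
        intro hmem; have := hk _ hmem; omega
      have h1 : ∀ y ∈ l.filter (fun s => PySem.Str.len s == k), ¬ (PySem.Str.len y < PySem.Str.len x) := by
        intro y hy
        have := (List.mem_filter.mp hy).2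
        simp only [beq_iff_eq] at this
        omega
      have h2 : ∀ y ∈ bucketize ks l, PySem.Str.len y < PySem.Str.len x := by
        intro y hy
        rcases mem_bucketize hy with ⟨k', hk', he⟩
        have := hk _ hk'; omega
      have hbx : (PySem.Str.len x == k) = true := by simp only [beq_iff_eq]; omega
      rw [bucketize_cons, insertBy_append_ge h1, insertBy_all_lt h2,
        show insKey (PySem.Str.len x) (k :: ks) = k :: ks from by
          simp only [insKey]; rw [if_neg (by omega), if_pos (by omega)]]
      conv_rhs => rw [bucketize_cons, List.filter_append,
        show bucketize ks (l ++ [x]) = bucketize ks l from bucketize_append_notmem (by omega),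
        show List.filter (fun s => PySem.Str.len s == k) [x] = [x] from by
          simp only [List.filter_cons, List.filter_nil, hbx, if_true]]
      simp
    · -- len x belongs in the tail
      have h1 : ∀ y ∈ l.filter (fun s => PySem.Str.len s == k), ¬ (PySem.Str.len y < PySem.Str.len x) := by
        intro y hy
        have := (List.mem_filter.mp hy).2
        simp only [beq_iff_eq] at this
        omega
      have hl' : ∀ y ∈ l, PySem.Str.len y = PySem.Str.len x → PySem.Str.len x ∈ ks := by
        intro y hy he
        rcases List.mem_cons.mp (hl y hy he) with h0 | h0
        · omega
        · exact h0
      have hx0 : List.filter (fun s => PySem.Str.len s == k) [x] = [] := by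
        have hb : (PySem.Str.len x == k) = false := by
          simp only [beq_eq_false_iff_ne]; omega
        simp only [List.filter_cons, List.filter_nil, hb, Bool.false_eq_true, if_false]
      rw [bucketize_cons, insertBy_append_ge h1,
        show insKey (PySem.Str.len x) (k :: ks) = k :: insKey (PySem.Str.len x) ks from by
          simp only [insKey]; rw [if_neg (by omega), if_neg (by omega)]]
      conv_rhs => rw [bucketize_cons, List.filter_append, hx0, List.append_nil]
      rw [ih ht hl']

theorem foldl_insertBy_bucketize (u : List String) :
    ∀ (ks : List Int) (l : List String), ks.Pairwise (fun a b => b < a) →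
    (∀ y ∈ l, PySem.Str.len y ∈ ks) →
    u.foldl (fun acc x => PySem.List.insertBy gtLen x acc) (bucketize ks l) =
      bucketize (u.foldl (fun ks x => insKey (PySem.Str.len x) ks) ks) (l ++ u) := by
  induction u with
  | nil => intro ks l _ _; simp
  | cons x u ih =>
    intro ks l hp hl
    simp only [List.foldl_cons]
    rw [insertBy_bucketize_step x hp (fun y hy he => he ▸ hl y hy)]
    rw [ih (insKey (PySem.Str.len x) ks) (l ++ [x]) (pairwise_insKey hp) ?_]
    · rw [List.append_assoc]; rfl
    · intro y hy
      rcases List.mem_append.mp hy with hy | hy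
      · exact mem_insKey.mpr (Or.inr (hl y hy))
      · rcases List.mem_singleton.mp hy with rfl
        exact mem_insKey.mpr (Or.inl rfl)

theorem mem_foldl_insKey (u : List String) :
    ∀ (ks : List Int) (m : Int),
      m ∈ u.foldl (fun ks x => insKey (PySem.Str.len x) ks) ks ↔
        m ∈ ks ∨ m ∈ u.map (fun s => PySem.Str.len s) := by
  induction u with
  | nil => simp
  | cons x u ih =>
    intro ks m
    simp only [List.foldl_cons, ih, mem_insKey, List.map_cons, List.mem_cons]
    tauto

theorem pairwise_foldl_insKey (u : List String) :
    ∀ (ks : List Int), ks.Pairwise (fun a b => b < a) →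
      (u.foldl (fun ks x => insKey (PySem.Str.len x) ks) ks).Pairwise (fun a b => b < a) := by
  induction u with
  | nil => intro ks h; exact h
  | cons x u ih => intro ks h; exact ih _ (pairwise_insKey h)

-- the key lemma: A's stable reverse sort by length equals B's bucket concatenation
theorem sort_eq_buckets (u : List String) :
    PySem.List.sorted u (fun p => PySem.Str.len p) true =
      (PySem.List.sorted
          (PySem.Dict.keys (u.foldl (fun (d : PySem.Dict Int (List String)) p =>
              PySem.Dict.modify d (PySem.Str.len p) [] (fun b => b ++ [p])) PySem.Dict.empty))
          (fun k => k) true).foldl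
        (fun acc k => acc ++ PySem.Dict.getD (u.foldl (fun (d : PySem.Dict Int (List String)) p =>
              PySem.Dict.modify d (PySem.Str.len p) [] (fun b => b ++ [p])) PySem.Dict.empty) k []) [] := by
  have hkeys : (u.foldl (fun (d : PySem.Dict Int (List String)) p =>
      PySem.Dict.modify d (PySem.Str.len p) [] (fun b => b ++ [p])) PySem.Dict.empty).keys
      = PySem.Set.ofList (u.map (fun s => PySem.Str.len s)) := by
    rw [PySem.Dict.keys_foldl_modify_key]
    simp only [PySem.Dict.keys_empty, PySem.Set.update, PySem.Set.ofList_eq_foldl]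
  have hgetD : ∀ k : Int, PySem.Dict.getD (u.foldl (fun (d : PySem.Dict Int (List String)) p =>
      PySem.Dict.modify d (PySem.Str.len p) [] (fun b => b ++ [p])) PySem.Dict.empty) k []
      = u.filter (fun s => PySem.Str.len s == k) := by
    intro k
    have hm : (u.foldl (fun (d : PySem.Dict Int (List String)) p =>
        PySem.Dict.modify d (PySem.Str.len p) [] (fun b => b ++ [p])) PySem.Dict.empty)
        = (u.map (fun p => (PySem.Str.len p, p))).foldl
            (fun d q => PySem.Dict.modify d q.1 [] (fun b => b ++ [q.2])) PySem.Dict.empty := by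
      rw [List.foldl_map]
    rw [hm, PySem.Dict.getD_foldl_modify_append]
    simp only [PySem.Dict.getD_empty, List.nil_append, List.filter_map, List.map_map,
      Function.comp_def]
    simp
  rw [PySem.List.foldl_append_eq_flatMap]
  rw [show (fun k => PySem.Dict.getD (u.foldl (fun (d : PySem.Dict Int (List String)) p =>
      PySem.Dict.modify d (PySem.Str.len p) [] (fun b => b ++ [p])) PySem.Dict.empty) k [])
      = (fun k => u.filter (fun s => PySem.Str.len s == k)) from funext hgetD]
  rw [hkeys]
  have hksp := pairwise_foldl_insKey u [] (by simp)
  have hnodup1 : (u.foldl (fun ks x => insKey (PySem.Str.len x) ks) []).Nodup :=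
    hksp.imp (fun h => ne_of_gt h)
  have hperm : (u.foldl (fun ks x => insKey (PySem.Str.len x) ks) []).Perm
      (PySem.Set.ofList (u.map (fun s => PySem.Str.len s))) := by
    rw [List.perm_ext_iff_of_nodup hnodup1 (PySem.Set.nodup_ofList _)]
    intro a
    rw [mem_foldl_insKey, PySem.Set.mem_ofList]
    simp
  rw [PySem.List.sorted_rev_eq_of_perm_of_pairwise_gt _ _ _ hperm hksp]
  rw [PySem.List.sorted_rev_eq_foldl_insertBy]
  have h0 := foldl_insertBy_bucketize u [] [] (by simp) (by simp)
  simp only [bucketize, List.nil_append] at h0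
  exact h0

-- B's dict.setdefault dedup produces (as its value list) exactly A's `unique` list
theorem dedup_pair (ps : List String) : ∀ (d : PySem.Dict String String),
    ((ps.foldl (fun d p =>
        PySem.Dict.setdefault d (PySem.Str.lower (PySem.Str.strip p)) p) d).keys,
     (ps.foldl (fun d p =>
        PySem.Dict.setdefault d (PySem.Str.lower (PySem.Str.strip p)) p) d).values)
    = ps.foldl (fun (st : PySem.Set String × List String) p =>
        if PySem.Set.contains st.1 (PySem.Str.lower (PySem.Str.strip p)) then st
        else (PySem.Set.add st.1 (PySem.Str.lower (PySem.Str.strip p)), st.2 ++ [p]))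
        (d.keys, d.values) := by
  induction ps with
  | nil => intro d; rfl
  | cons p ps ih =>
    intro d
    simp only [List.foldl_cons]
    by_cases hm : (PySem.Str.lower (PySem.Str.strip p)) ∈ d.keys
    · have hc : PySem.Dict.contains d (PySem.Str.lower (PySem.Str.strip p)) = true := by
        rw [PySem.Dict.contains_eq_decide_mem_keys]; exact decide_eq_true hm
      have hs : PySem.Set.contains d.keys (PySem.Str.lower (PySem.Str.strip p)) = true :=
        (PySem.Set.contains_iff _ _).mpr hm
      rw [PySem.Dict.setdefault_of_contains _ _ hc]
      simp only [hs, if_true]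
      exact ih d
    · have hc : PySem.Dict.contains d (PySem.Str.lower (PySem.Str.strip p)) = false := by
        rw [PySem.Dict.contains_eq_decide_mem_keys]; exact decide_eq_false hm
      have hs : PySem.Set.contains d.keys (PySem.Str.lower (PySem.Str.strip p)) = false := by
        rw [Bool.eq_false_iff]
        intro h; exact hm ((PySem.Set.contains_iff _ _).mp h)
      rw [PySem.Dict.setdefault_of_not_contains _ _ hc]
      simp only [hs, Bool.false_eq_true, if_false]
      have hk : (d.insert (PySem.Str.lower (PySem.Str.strip p)) p).keys = d.keys ++ [PySem.Str.lower (PySem.Str.strip p)] :=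
        PySem.Dict.keys_insert_of_not_contains _ _ hc
      have hv : (d.insert (PySem.Str.lower (PySem.Str.strip p)) p).values = d.values ++ [p] := by
        simp [PySem.Dict.values, PySem.Dict.items_insert_of_not_contains d p hc]
      have ha : PySem.Set.add d.keys (PySem.Str.lower (PySem.Str.strip p)) = d.keys ++ [PySem.Str.lower (PySem.Str.strip p)] :=
        PySem.Set.add_of_not_mem hm
      rw [← ha] at hk
      have := ih (d.insert (PySem.Str.lower (PySem.Str.strip p)) p)
      rw [hk, hv] at this
      exact this

-- ===== VERDICT (by name: the statement is the Claim_ definition above) =====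
theorem pick_diverse_prompts_py_spec : Claim_equal_pick_diverse_prompts_py := by
  intro prompts max_count _
  unfold Spec_pick_diverse_prompts_py pick_diverse_prompts_py pick_diverse_prompts_py_alt
  dsimp only
  have hv : PySem.Dict.values (prompts.foldl (fun (d : PySem.Dict String String) p =>
      PySem.Dict.setdefault d (PySem.Str.lower (PySem.Str.strip p)) p) PySem.Dict.empty)
      = (prompts.foldl (fun (st : PySem.Set String × List String) p =>
          if PySem.Set.contains st.1 (PySem.Str.lower (PySem.Str.strip p)) then st
          else (PySem.Set.add st.1 (PySem.Str.lower (PySem.Str.strip p)), st.2 ++ [p]))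
          (PySem.Set.empty, ([] : List String))).2 := by
    have := dedup_pair prompts PySem.Dict.empty
    exact congrArg Prod.snd this
  rw [hv]
  exact congrArg (fun r => PySem.List.slice r none (some max_count)) (sort_eq_buckets _)
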